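-- pv_equiv track=rewrite | github.com/HenriqueProj/FP-Projects | Buggy_DataBase/BDB.py | obter_num_seguranca
-- ===== SOURCE A (Python) =====
-- def obter_num_seguranca(tuplo):
--     nums = []
--     for x in range(len(tuplo)):
--         for y in range(len(tuplo)):
--             if x != y:
--                 if tuplo[x] > tuplo[y]:
--                     nums += [x-y]
--                 elif tuplo[x] < tuplo[y]:
--                     nums += [y - x]
--                 else:
--                     return 0
--     for z in range(len(nums) - 1):
--         if nums[z+1] > nums[0]:
--             nums[0] = nums[z+1]
--     return nums[0]
-- ===== SOURCE B (Python) =====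
-- def obter_num_seguranca(tuplo):
--     n = len(tuplo)
--     if len(set(tuplo)) != n:
--         return 0
--     order = sorted(range(n), key=lambda i: tuplo[i])
--     best = -1
--     minidx = None
--     for p in order:
--         if minidx is not None and p - minidx > best:
--             best = p - minidx
--         if minidx is None or p < minidx:
--             minidx = p
--     return best
-- ===== Notes on version B (the rewrite author's own statement) =====
-- stated objective: faster
-- what changed: Replaces A's O(n^2) all-ordered-pairs scan (which builds a list of index gaps and then takes its maximum in a second pass) by a set-based duplicate check plus a sort of the indices by value followed by a single prefix-minimum scan.
import Mathlib
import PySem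

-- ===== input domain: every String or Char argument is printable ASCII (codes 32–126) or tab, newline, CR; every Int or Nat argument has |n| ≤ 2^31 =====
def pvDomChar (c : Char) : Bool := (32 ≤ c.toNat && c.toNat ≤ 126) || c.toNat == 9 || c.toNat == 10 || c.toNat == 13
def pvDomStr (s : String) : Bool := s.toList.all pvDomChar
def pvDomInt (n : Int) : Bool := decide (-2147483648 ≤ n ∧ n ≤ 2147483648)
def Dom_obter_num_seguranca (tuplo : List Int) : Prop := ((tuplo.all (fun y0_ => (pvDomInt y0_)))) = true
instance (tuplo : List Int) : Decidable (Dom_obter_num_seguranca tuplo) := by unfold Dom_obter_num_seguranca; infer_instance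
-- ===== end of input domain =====

-- B replaces A's O(n^2) all-pairs scan by a sort of the indices by value plus one
-- prefix-minimum pass (O(n log n)); duplicates are detected with a set up front.

-- ===== PORT A =====
-- inner 'for y in range(len(tuplo))' loop; 'none' models the early 'return 0'
def pvA_loop (t : List Int) (x : Int) : List Int → List Int → Option (List Int)
  | [], nums => some nums
  | y :: ys, nums =>
      if x ≠ y then
        if PySem.List.pyGetD t x 0 > PySem.List.pyGetD t y 0 then
          pvA_loop t x ys (nums ++ [x - y])
        else if PySem.List.pyGetD t x 0 < PySem.List.pyGetD t y 0 then
          pvA_loop t x ys (nums ++ [y - x])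
        else none
      else pvA_loop t x ys nums

-- outer 'for x in range(len(tuplo))' loop
def pvA_outer (t : List Int) : List Int → List Int → Option (List Int)
  | [], nums => some nums
  | x :: xs, nums =>
      match pvA_loop t x (PySem.List.pyRange 0 (t.length : Int) 1) nums with
      | none => none
      | some nums' => pvA_outer t xs nums'

def obter_num_seguranca (tuplo : List Int) : Int :=
  match pvA_outer tuplo (PySem.List.pyRange 0 (tuplo.length : Int) 1) [] with
  | none => 0
  | some nums =>
      -- 'for z in range(len(nums)-1): if nums[z+1] > nums[0]: nums[0] = nums[z+1]'
      -- only nums[0] is ever written, so it is carried as the accumulator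
      (PySem.List.pyRange 0 ((nums.length : Int) - 1) 1).foldl
        (fun m z => if PySem.List.pyGetD nums (z + 1) 0 > m then PySem.List.pyGetD nums (z + 1) 0 else m)
        (PySem.List.pyGetD nums 0 0)

-- ===== PORT B =====
-- one step of the prefix-minimum scan: state = (best, minidx)
def pvB_step (st : Int × Option Int) (p : Int) : Int × Option Int :=
  let best := match st.2 with
    | some m => if p - m > st.1 then p - m else st.1
    | none => st.1
  let mi : Option Int := match st.2 with
    | some m => if p < m then some p else some m
    | none => some p
  (best, mi)

def obter_num_seguranca_alt (tuplo : List Int) : Int :=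
  let n : Int := tuplo.length
  if PySem.Set.len (PySem.Set.ofList tuplo) ≠ n then 0
  else
    let order := PySem.List.sorted (PySem.List.pyRange 0 n 1)
      (fun i => PySem.List.pyGetD tuplo i 0) false
    (order.foldl pvB_step (-1, none)).1

-- ===== PRECONDITION & SPEC =====
-- Pre_ excludes lists of fewer than two elements, on which A raises IndexError (nums[0] with nums = []).
def Pre_obter_num_seguranca (tuplo : List Int) : Prop := 2 ≤ tuplo.length
instance (tuplo : List Int) : Decidable (Pre_obter_num_seguranca tuplo) := by
  unfold Pre_obter_num_seguranca; infer_instance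

def pvWitness_obter_num_seguranca : List Int := [3, 1, 2]

def Spec_obter_num_seguranca (tuplo : List Int) (out : Int) : Prop := out = obter_num_seguranca_alt tuplo
instance (tuplo : List Int) (out : Int) : Decidable (Spec_obter_num_seguranca tuplo out) := by
  unfold Spec_obter_num_seguranca; infer_instance

-- ===== CLAIM (what is proved, stated in full; the proofs are below) =====
def Claim_equal_obter_num_seguranca : Prop := ∀ (tuplo : List Int), Dom_obter_num_seguranca tuplo → Pre_obter_num_seguranca tuplo → Spec_obter_num_seguranca tuplo (obter_num_seguranca tuplo)


-- ===== LEMMAS AND PROOFS =====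

-- abbreviations used only by the proofs
def pvG (t : List Int) (i : Int) : Int := PySem.List.pyGetD t i 0
def pvRange (t : List Int) : List Int := PySem.List.pyRange 0 (t.length : Int) 1
def pvW (t : List Int) (x y : Int) : Int := if pvG t x > pvG t y then x - y else y - x
def pvNums (t : List Int) : List Int :=
  (pvRange t).flatMap (fun x => ((pvRange t).filter (fun y => y != x)).map (fun y => pvW t x y))
def pvMax (l : List Int) (a : Int) : Int := l.foldl (fun m v => if v > m then v else m) a
def pvPair (t : List Int) (a b : Int) : Prop := a ∈ pvRange t ∧ b ∈ pvRange t ∧ pvG t a < pvG t b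
def pvOrder (t : List Int) : List Int :=
  PySem.List.sorted (pvRange t) (fun i => PySem.List.pyGetD t i 0) false
def pvMinAcc (l : List Int) (m : Int) : Int := l.foldl (fun m x => if x < m then x else m) m

-- ===== A-side lemmas =====
theorem pv_loop_char (t : List Int) (x : Int) :
    ∀ (ys nums : List Int), (∀ y ∈ ys, y ≠ x → pvG t x ≠ pvG t y) →
    pvA_loop t x ys nums =
      some (nums ++ (ys.filter (fun y => y != x)).map (fun y => pvW t x y)) := by
  intro ys
  induction ys with
  | nil => intro nums h; simp [pvA_loop]
  | cons y ys ih =>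
    intro nums h
    by_cases hyx : y = x
    · subst hyx
      simp only [pvA_loop, ne_eq, not_true_eq_false, reduceIte, List.filter_cons,
        bne_self_eq_false, Bool.false_eq_true]
      exact ih nums (fun z hz => h z (List.mem_cons_of_mem _ hz))
    · have hne : pvG t x ≠ pvG t y := h y (List.mem_cons_self) hyx
      have hxy : x ≠ y := fun hh => hyx hh.symm
      rcases lt_or_gt_of_ne hne with hlt | hgt
      · have h1 : ¬ (PySem.List.pyGetD t x 0 > PySem.List.pyGetD t y 0) := by
          simp [pvG] at hlt; omega
        have h2 : PySem.List.pyGetD t x 0 < PySem.List.pyGetD t y 0 := by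
          simp [pvG] at hlt; omega
        simp only [pvA_loop, hxy, ne_eq, not_false_eq_true, reduceIte, h1, h2,
          List.filter_cons, bne_iff_ne, hyx]
        rw [ih _ (fun z hz => h z (List.mem_cons_of_mem _ hz))]
        simp only [pvW, pvG, List.map_cons, List.append_assoc, List.singleton_append,
          Option.some.injEq, List.append_cancel_left_eq, List.cons.injEq, and_true]
        rw [if_neg h1]
      · have h1 : PySem.List.pyGetD t x 0 > PySem.List.pyGetD t y 0 := by
          simp [pvG] at hgt; omega
        simp only [pvA_loop, hxy, ne_eq, not_false_eq_true, reduceIte, h1,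
          List.filter_cons, bne_iff_ne, hyx]
        rw [ih _ (fun z hz => h z (List.mem_cons_of_mem _ hz))]
        simp only [pvW, pvG, List.map_cons, List.append_assoc, List.singleton_append,
          Option.some.injEq, List.append_cancel_left_eq, List.cons.injEq, and_true]
        omega

theorem pv_outer_char (t : List Int) :
    ∀ (xs nums : List Int), (∀ x ∈ xs, ∀ y ∈ pvRange t, y ≠ x → pvG t x ≠ pvG t y) →
    pvA_outer t xs nums =
      some (nums ++ xs.flatMap (fun x => ((pvRange t).filter (fun y => y != x)).map (fun y => pvW t x y))) := by
  intro xs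
  induction xs with
  | nil => intro nums h; simp [pvA_outer]
  | cons x xs ih =>
    intro nums h
    have hx := h x (List.mem_cons_self)
    have hloop := pv_loop_char t x (pvRange t) nums (fun y hy hyx => hx y hy hyx)
    have step : pvA_outer t (x :: xs) nums =
        pvA_outer t xs (nums ++ (List.filter (fun y => y != x) (pvRange t)).map (fun y => pvW t x y)) := by
      simp only [pvA_outer]
      rw [show PySem.List.pyRange 0 (t.length : Int) 1 = pvRange t from rfl, hloop]
    rw [step, ih _ (fun z hz => h z (List.mem_cons_of_mem _ hz))]
    simp [List.flatMap_cons, List.append_assoc]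

theorem pv_loop_some (t : List Int) (x : Int) :
    ∀ (ys nums r : List Int), pvA_loop t x ys nums = some r →
    ∀ y ∈ ys, y ≠ x → pvG t x ≠ pvG t y := by
  intro ys
  induction ys with
  | nil => intro nums r _ y hy; simp at hy
  | cons y ys ih =>
    intro nums r hr z hz hzx
    rcases List.mem_cons.1 hz with rfl | hz'
    · intro heq
      have hxy : x ≠ z := fun hh => hzx hh.symm
      simp only [pvA_loop, ne_eq, hxy, not_false_eq_true, reduceIte] at hr
      have h1 : ¬ (PySem.List.pyGetD t x 0 > PySem.List.pyGetD t z 0) := by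
        simp [pvG] at heq; omega
      have h2 : ¬ (PySem.List.pyGetD t x 0 < PySem.List.pyGetD t z 0) := by
        simp [pvG] at heq; omega
      simp [h1, h2] at hr
    · by_cases hxy : x = y
      · subst hxy
        simp only [pvA_loop, ne_eq, not_true_eq_false, reduceIte] at hr
        exact ih _ _ hr z hz' hzx
      · simp only [pvA_loop, ne_eq, hxy, not_false_eq_true, reduceIte] at hr
        split_ifs at hr with h1 h2
        · exact ih _ _ hr z hz' hzx
        · exact ih _ _ hr z hz' hzx

theorem pv_outer_some (t : List Int) :
    ∀ (xs nums r : List Int), pvA_outer t xs nums = some r →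
    ∀ x ∈ xs, ∀ y ∈ pvRange t, y ≠ x → pvG t x ≠ pvG t y := by
  intro xs
  induction xs with
  | nil => intro nums r _ x hx; simp at hx
  | cons x xs ih =>
    intro nums r hr z hz y hy hyx
    simp only [pvA_outer] at hr
    rcases hloop : pvA_loop t x (PySem.List.pyRange 0 (t.length : Int) 1) nums with _ | nums'
    · rw [hloop] at hr; simp at hr
    · rw [hloop] at hr
      rcases List.mem_cons.1 hz with rfl | hz'
      · exact pv_loop_some t z _ _ _ hloop y hy hyx
      · exact ih _ _ hr z hz' y hy hyx

theorem pvG_inj (t : List Int) (ht : t.Nodup) {a b : Int}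
    (ha : a ∈ pvRange t) (hb : b ∈ pvRange t) (hab : a ≠ b) : pvG t a ≠ pvG t b := by
  intro heq
  rw [pvRange, PySem.List.mem_pyRange_one] at ha hb
  rw [pvG, pvG, PySem.List.pyGetD_eq_getElem t 0 ha.1 ha.2,
      PySem.List.pyGetD_eq_getElem t 0 hb.1 hb.2] at heq
  have := (ht.getElem_inj_iff).1 heq
  omega

theorem pv_ofList_lt (t : List Int) (ht : ¬ t.Nodup) :
    (PySem.Set.ofList t).length < t.length := by
  induction t with
  | nil => exact absurd List.nodup_nil ht
  | cons x xs ih =>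
    rw [PySem.Set.ofList_cons]
    simp only [List.length_cons]
    by_cases hx : x ∈ xs
    · have hx' : x ∈ PySem.Set.ofList xs := (PySem.Set.mem_ofList xs x).2 hx
      have hlt : ((PySem.Set.ofList xs).discard x).length < (PySem.Set.ofList xs).length := by
        simp only [PySem.Set.discard]
        exact List.length_filter_lt_length_iff_exists.2 ⟨x, hx', by simp⟩
      have hle := PySem.Set.length_ofList_le xs
      omega
    · have hnd : ¬ xs.Nodup := fun h => ht (List.nodup_cons.2 ⟨hx, h⟩)
      have h1 := ih hnd
      have h2 : ((PySem.Set.ofList xs).discard x).length ≤ (PySem.Set.ofList xs).length := by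
        simp only [PySem.Set.discard]
        exact List.length_filter_le _ _
      omega

theorem pvMax_init_le (l : List Int) (a : Int) : a ≤ pvMax l a := by
  induction l generalizing a with
  | nil => simp [pvMax]
  | cons v l ih =>
    simp only [pvMax, List.foldl_cons]
    exact le_trans (by split <;> omega) (ih (if v > a then v else a))

theorem pvMax_mem_le (l : List Int) (a : Int) : ∀ v ∈ l, v ≤ pvMax l a := by
  induction l generalizing a with
  | nil => simp
  | cons w l ih =>
    intro v hv
    rcases List.mem_cons.1 hv with rfl | hv'
    · simp only [pvMax, List.foldl_cons]
      exact le_trans (by split <;> omega) (pvMax_init_le l _)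
    · simp only [pvMax, List.foldl_cons]
      exact ih _ v hv' 

theorem pvMax_mem_or (l : List Int) (a : Int) : pvMax l a = a ∨ pvMax l a ∈ l := by
  induction l generalizing a with
  | nil => left; rfl
  | cons w l ih =>
    simp only [pvMax, List.foldl_cons]
    rcases ih (if w > a then w else a) with h | h
    · rw [pvMax] at h
      rw [h]
      split
      · right; exact List.mem_cons_self
      · left; rfl
    · right; exact List.mem_cons_of_mem _ h

-- the second loop of A is the running maximum of nums
theorem pv_secondloop (v : Int) (rest : List Int) :
    (PySem.List.pyRange 0 (((v :: rest).length : Int) - 1) 1).foldl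
      (fun m z => if PySem.List.pyGetD (v :: rest) (z + 1) 0 > m then PySem.List.pyGetD (v :: rest) (z + 1) 0 else m)
      (PySem.List.pyGetD (v :: rest) 0 0) = pvMax rest v := by
  have hlen : (((v :: rest).length : Int) - 1) = (rest.length : Int) := by
    simp [List.length_cons]
  rw [hlen]
  have h0 : PySem.List.pyGetD (v :: rest) 0 0 = v := by
    rw [PySem.List.pyGetD_eq_getElem _ 0 (by omega) (by simp)]
    simp
  rw [h0]
  have hshift : ∀ (acc : Int), ∀ z ∈ PySem.List.pyRange 0 (rest.length : Int) 1,
      (fun m z => if PySem.List.pyGetD (v :: rest) (z + 1) 0 > m then PySem.List.pyGetD (v :: rest) (z + 1) 0 else m) acc z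
        = (fun m z => if PySem.List.pyGetD rest z 0 > m then PySem.List.pyGetD rest z 0 else m) acc z := by
    intro acc z hz
    rw [PySem.List.mem_pyRange_one] at hz
    have hg : PySem.List.pyGetD (v :: rest) (z + 1) 0 = PySem.List.pyGetD rest z 0 := by
      rw [PySem.List.pyGetD_eq_getElem _ 0 (by omega) (by simp; omega),
          PySem.List.pyGetD_eq_getElem _ 0 (by omega) (by omega)]
      have hzt : (z + 1).toNat = z.toNat + 1 := by omega
      simp [hzt]
    simp only [hg]
  rw [PySem.List.foldl_congr_mem _ _ _ _ hshift]
  exact PySem.List.foldl_pyRange_zero_pyGetD' rest 0 (fun m w => if w > m then w else m) v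

theorem pv_mem_pvNums (t : List Int) (u : Int) :
    u ∈ pvNums t ↔ ∃ x y, x ∈ pvRange t ∧ y ∈ pvRange t ∧ y ≠ x ∧ u = pvW t x y := by
  simp only [pvNums, List.mem_flatMap, List.mem_map, List.mem_filter, bne_iff_ne, ne_eq]
  constructor
  · rintro ⟨x, hx, y, ⟨hy, hyx⟩, rfl⟩
    exact ⟨x, y, hx, hy, hyx, rfl⟩
  · rintro ⟨x, y, hx, hy, hyx, rfl⟩
    exact ⟨x, hx, y, ⟨hy, hyx⟩, rfl⟩

theorem pv_pair_of_mem (t : List Int) (ht : t.Nodup) {u : Int} (hu : u ∈ pvNums t) :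
    ∃ a b, pvPair t a b ∧ u = b - a := by
  obtain ⟨x, y, hx, hy, hyx, rfl⟩ := (pv_mem_pvNums t _).1 hu
  by_cases hgt : pvG t x > pvG t y
  · exact ⟨y, x, ⟨hy, hx, hgt⟩, by simp [pvW, hgt]⟩
  · have hne := pvG_inj t ht hx hy (fun hh => hyx hh.symm)
    have hlt : pvG t x < pvG t y := by omega
    exact ⟨x, y, ⟨hx, hy, hlt⟩, by simp [pvW, hgt]⟩

theorem pv_mem_of_pair (t : List Int) {a b : Int} (h : pvPair t a b) : b - a ∈ pvNums t := by
  obtain ⟨ha, hb, hlt⟩ := h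
  have hab : a ≠ b := fun hh => by rw [hh] at hlt; omega
  refine (pv_mem_pvNums t _).2 ⟨b, a, hb, ha, hab, ?_⟩
  simp only [pvW]
  rw [if_pos hlt]

-- ===== B-side lemmas =====
theorem pvB_step_some (best m x : Int) :
    pvB_step (best, some m) x =
      (if x - m > best then x - m else best, some (if x < m then x else m)) := by
  simp only [pvB_step]
  split_ifs <;> rfl

theorem pvB_step_none (best x : Int) : pvB_step (best, none) x = (best, some x) := rfl

theorem pvB_fst_mono : ∀ (l : List Int) (st : Int × Option Int), st.1 ≤ (l.foldl pvB_step st).1 := by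
  intro l
  induction l with
  | nil => intro st; simp
  | cons x l ih =>
    intro st
    rw [List.foldl_cons]
    refine le_trans ?_ (ih (pvB_step st x))
    rcases st with ⟨b, _ | m⟩
    · rfl
    · rw [pvB_step_some]
      dsimp only
      split <;> omega

theorem pvB_ge : ∀ (l : List Int) (best m b : Int), b ∈ l →
    b - m ≤ (l.foldl pvB_step (best, some m)).1 := by
  intro l
  induction l with
  | nil => intro best m b hb; simp at hb
  | cons x l ih =>
    intro best m b hb
    rw [List.foldl_cons, pvB_step_some]
    rcases List.mem_cons.1 hb with rfl | hb'
    · refine le_trans ?_ (pvB_fst_mono l _)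
      dsimp only
      split <;> omega
    · refine le_trans ?_ (ih _ (if x < m then x else m) b hb')
      split <;> omega

theorem pvB_snd : ∀ (l : List Int) (best m : Int),
    (l.foldl pvB_step (best, some m)).2 = some (pvMinAcc l m) := by
  intro l
  induction l with
  | nil => intro best m; simp [pvMinAcc]
  | cons x l ih =>
    intro best m
    rw [List.foldl_cons, pvB_step_some]
    rw [ih]
    rfl

theorem pvMinAcc_le_self : ∀ (l : List Int) (m : Int), pvMinAcc l m ≤ m := by
  intro l
  induction l with
  | nil => intro m; simp [pvMinAcc]
  | cons x l ih =>
    intro m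
    simp only [pvMinAcc, List.foldl_cons]
    exact le_trans (ih _) (by split <;> omega)

theorem pvMinAcc_le_mem : ∀ (l : List Int) (m b : Int), b ∈ l → pvMinAcc l m ≤ b := by
  intro l
  induction l with
  | nil => intro m b hb; simp at hb
  | cons x l ih =>
    intro m b hb
    rcases List.mem_cons.1 hb with rfl | hb'
    · simp only [pvMinAcc, List.foldl_cons]
      exact le_trans (pvMinAcc_le_self l _) (by split <;> omega)
    · exact ih _ b hb' 

theorem pvB_ub (t : List Int) (r : Int)
    (hp : ∀ a b, a ∈ pvRange t → b ∈ pvRange t → pvG t a < pvG t b → b - a ≤ r) :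
    ∀ (l : List Int) (m best : Int),
      (m :: l).Pairwise (fun a b => pvG t a < pvG t b) →
      (∀ z ∈ m :: l, z ∈ pvRange t) → best ≤ r →
      (l.foldl pvB_step (best, some m)).1 ≤ r := by
  intro l
  induction l with
  | nil =>
    intro m best _ _ hbest
    simpa using hbest
  | cons x l ih =>
    intro m best hpw hmem hbest
    rw [List.foldl_cons, pvB_step_some]
    rcases List.pairwise_cons.1 hpw with ⟨hm, hpw'⟩
    rcases List.pairwise_cons.1 hpw' with ⟨hx, hl⟩
    refine ih (if x < m then x else m) _ ?_ ?_ ?_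
    · refine List.pairwise_cons.2 ⟨?_, hl⟩
      intro y hy
      split
      · exact hx y hy
      · exact hm y (List.mem_cons_of_mem _ hy)
    · intro z hz
      rcases List.mem_cons.1 hz with rfl | hz'
      · split
        · exact hmem x (List.mem_cons_of_mem _ List.mem_cons_self)
        · exact hmem m List.mem_cons_self
      · exact hmem z (List.mem_cons_of_mem _ (List.mem_cons_of_mem _ hz'))
    · have hxm : pvG t m < pvG t x := hm x List.mem_cons_self
      have hxr : x - m ≤ r :=
        hp m x (hmem m List.mem_cons_self)
          (hmem x (List.mem_cons_of_mem _ List.mem_cons_self)) hxm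
      split <;> omega

theorem pvB_attains (t : List Int) (o : List Int) {a b : Int}
    (hpw : o.Pairwise (fun u v => pvG t u < pvG t v))
    (ha : a ∈ o) (hb : b ∈ o) (hab : pvG t a < pvG t b) :
    b - a ≤ (o.foldl pvB_step (-1, none)).1 := by
  obtain ⟨u, w, rfl⟩ := List.append_of_mem ha
  have hbw : b ∈ w := by
    rcases List.mem_append.1 hb with hbu | hbaw
    · rcases (List.pairwise_append.1 hpw) with ⟨_, _, hcross⟩
      have := hcross b hbu a List.mem_cons_self
      omega
    · rcases List.mem_cons.1 hbaw with rfl | hbw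
      · omega
      · exact hbw
  cases u with
  | nil =>
    simp only [List.nil_append, List.foldl_cons, pvB_step_none]
    exact pvB_ge w (-1) a b hbw
  | cons o u' =>
    have hre : (o :: u') ++ a :: w = o :: ((u' ++ [a]) ++ w) := by simp
    rw [hre, List.foldl_cons, pvB_step_none, List.foldl_append]
    set st2 := (u' ++ [a]).foldl pvB_step (-1, some o) with hst2
    have h2 : st2.2 = some (pvMinAcc (u' ++ [a]) o) := pvB_snd (u' ++ [a]) (-1) o
    have hm1 : pvMinAcc (u' ++ [a]) o ≤ a :=
      pvMinAcc_le_mem (u' ++ [a]) o a (by simp)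
    have hst : st2 = (st2.1, some (pvMinAcc (u' ++ [a]) o)) := by
      rw [← h2]
    rw [hst]
    refine le_trans ?_ (pvB_ge w st2.1 _ b hbw)
    omega

theorem pvB_bound (t : List Int) (o : List Int) (r : Int)
    (hpw : o.Pairwise (fun u v => pvG t u < pvG t v))
    (hmem : ∀ z ∈ o, z ∈ pvRange t) (hr : -1 ≤ r)
    (hp : ∀ a b, a ∈ pvRange t → b ∈ pvRange t → pvG t a < pvG t b → b - a ≤ r) :
    (o.foldl pvB_step (-1, none)).1 ≤ r := by
  cases o with
  | nil => simpa using hr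
  | cons o rest =>
    rw [List.foldl_cons, pvB_step_none]
    exact pvB_ub t r hp rest o (-1) hpw hmem hr

theorem pvOrder_pairwise (t : List Int) (ht : t.Nodup) :
    (pvOrder t).Pairwise (fun a b => pvG t a < pvG t b) := by
  have hperm := PySem.List.sorted_perm (pvRange t) (fun i => PySem.List.pyGetD t i 0) false
  have hnd : (pvOrder t).Nodup := (hperm.nodup_iff).2 (PySem.List.nodup_pyRange_one 0 _)
  have hpw := PySem.List.sorted_pairwise (pvRange t) (fun i => PySem.List.pyGetD t i 0)
  have hcomb := hpw.and hnd
  refine hcomb.imp_of_mem ?_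
  intro a b hamem hbmem hab
  have ha : a ∈ pvRange t := (PySem.List.mem_sorted _ _ _ _).1 hamem
  have hb : b ∈ pvRange t := (PySem.List.mem_sorted _ _ _ _).1 hbmem
  have hne := pvG_inj t ht ha hb hab.2
  have : pvG t a ≤ pvG t b := hab.1
  omega

-- ===== VERDICT (by name: the statement is the Claim_ definition above) =====
theorem obter_num_seguranca_spec : Claim_equal_obter_num_seguranca := by
  unfold Claim_equal_obter_num_seguranca
  intro t _ hpre
  unfold Spec_obter_num_seguranca
  unfold Pre_obter_num_seguranca at hpre
  by_cases hnd : t.Nodup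
  · -- no duplicate values
    have hforall : ∀ x ∈ pvRange t, ∀ y ∈ pvRange t, y ≠ x → pvG t x ≠ pvG t y :=
      fun x hx y hy hyx => pvG_inj t hnd hx hy (fun hh => hyx hh.symm)
    have houter := pv_outer_char t (pvRange t) [] (fun x hx y hy hyx => hforall x hx y hy hyx)
    have hnums : pvA_outer t (PySem.List.pyRange 0 (t.length : Int) 1) [] = some (pvNums t) := by
      rw [show PySem.List.pyRange 0 (t.length : Int) 1 = pvRange t from rfl, houter]
      simp [pvNums]
    have h0 : (0 : Int) ∈ pvRange t := by
      rw [pvRange, PySem.List.mem_pyRange_one]; omega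
    have h1 : (1 : Int) ∈ pvRange t := by
      rw [pvRange, PySem.List.mem_pyRange_one]
      constructor
      · omega
      · exact_mod_cast by omega
    have hnenil : pvNums t ≠ [] :=
      List.ne_nil_of_mem ((pv_mem_pvNums t _).2 ⟨1, 0, h1, h0, by omega, rfl⟩)
    obtain ⟨v, rest, hvr⟩ := List.exists_cons_of_ne_nil hnenil
    have hA : obter_num_seguranca t = pvMax rest v := by
      unfold obter_num_seguranca
      rw [hnums, hvr]
      exact pv_secondloop v rest
    have hAmem : pvMax rest v ∈ pvNums t := by
      rw [hvr]
      rcases pvMax_mem_or rest v with h | h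
      · rw [h]; exact List.mem_cons_self
      · exact List.mem_cons_of_mem _ h
    have hAub : ∀ u ∈ pvNums t, u ≤ pvMax rest v := by
      intro u hu
      rw [hvr] at hu
      rcases List.mem_cons.1 hu with rfl | hu'
      · exact pvMax_init_le rest u
      · exact pvMax_mem_le rest v u hu'
    have hBeq : obter_num_seguranca_alt t = ((pvOrder t).foldl pvB_step (-1, none)).1 := by
      unfold obter_num_seguranca_alt
      rw [if_neg]
      · rfl
      · rw [PySem.Set.ofList_eq_self_of_nodup t hnd]
        simp
    have hpw := pvOrder_pairwise t hnd
    have hordmem : ∀ z ∈ pvOrder t, z ∈ pvRange t :=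
      fun z hz => (PySem.List.mem_sorted _ _ _ _).1 hz
    obtain ⟨a, b, hpair, hval⟩ := pv_pair_of_mem t hnd hAmem
    have hao : a ∈ pvOrder t := (PySem.List.mem_sorted _ _ _ _).2 hpair.1
    have hbo : b ∈ pvOrder t := (PySem.List.mem_sorted _ _ _ _).2 hpair.2.1
    have hle1 : pvMax rest v ≤ ((pvOrder t).foldl pvB_step (-1, none)).1 := by
      rw [hval]
      exact pvB_attains t (pvOrder t) hpw hao hbo hpair.2.2
    have hm1 : (-1 : Int) ≤ pvMax rest v := by
      by_cases hc : pvG t 0 < pvG t 1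
      · have := hAub _ (pv_mem_of_pair t ⟨h0, h1, hc⟩)
        omega
      · have hne01 := pvG_inj t hnd h0 h1 (by omega)
        have hc' : pvG t 1 < pvG t 0 := by omega
        have := hAub _ (pv_mem_of_pair t ⟨h1, h0, hc'⟩)
        omega
    have hp : ∀ a b : Int, a ∈ pvRange t → b ∈ pvRange t → pvG t a < pvG t b →
        b - a ≤ pvMax rest v :=
      fun a b ha hb hl => hAub _ (pv_mem_of_pair t ⟨ha, hb, hl⟩)
    have hle2 := pvB_bound t (pvOrder t) (pvMax rest v) hpw hordmem hm1 hp
    rw [hA, hBeq]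
    omega
  · -- duplicate values: both sides return 0
    have hA : obter_num_seguranca t = 0 := by
      unfold obter_num_seguranca
      rcases houter : pvA_outer t (PySem.List.pyRange 0 (t.length : Int) 1) [] with _ | r
      · rfl
      · exfalso
        obtain ⟨i, j, heq, hne⟩ :
            ∃ i j : Fin t.length, t.get i = t.get j ∧ i ≠ j := by
          have := (not_iff_not.2 List.nodup_iff_injective_get).1 hnd
          rw [Function.not_injective_iff] at this
          exact this
        have hi : ((i : Nat) : Int) ∈ pvRange t := by
          rw [pvRange, PySem.List.mem_pyRange_one]
          constructor
          · omega
          · exact_mod_cast i.isLt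
        have hj : ((j : Nat) : Int) ∈ pvRange t := by
          rw [pvRange, PySem.List.mem_pyRange_one]
          constructor
          · omega
          · exact_mod_cast j.isLt
        have hij : ((j : Nat) : Int) ≠ ((i : Nat) : Int) := by
          intro hh
          exact hne (Fin.ext (by omega)).symm
        have hgne := pv_outer_some t _ _ _ houter _ hi _ hj hij
        apply hgne
        rw [pvG, pvG, PySem.List.pyGetD_natCast, PySem.List.pyGetD_natCast]
        rw [List.getD_eq_getElem t 0 i.isLt, List.getD_eq_getElem t 0 j.isLt]
        simpa [List.get_eq_getElem] using heq
    have hB : obter_num_seguranca_alt t = 0 := by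
      have hlt := pv_ofList_lt t hnd
      unfold obter_num_seguranca_alt
      rw [if_pos]
      simp only [PySem.Set.len, ne_eq]
      intro hh
      have : (PySem.Set.ofList t).length = t.length := by exact_mod_cast hh
      omega
    rw [hA, hB]
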